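-- pv_equiv track=rewrite | github.com/RohitY2J/Cryptography_Cryptopals | 6_break_repeating_key_xor.py | separate_blocks
-- ===== SOURCE A (Python) =====
-- def separate_blocks(enc_val, keysize):
--     #list to store all the blocks
--     blocks = []
--     #define an empty string for all the keys in the keysize
--     for i in range(keysize):
--         blocks.append('')
--
--     #separate the blocks
--     for j in range(len(enc_val)):
--         #we can find the corresponding index of each byte using % sign
--         # 1%29 = 1
--         # for 29 we get 0, so establish an extra condition
--         if (j+1)%keysize == 0:
--             blocks[keysize-1] += enc_val[j]
--         else:
--             blocks[(j+1)%keysize-1] += enc_val[j]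
--
--     return blocks
-- ===== SOURCE B (Python) =====
-- def separate_blocks(enc_val, keysize):
--     # block i is exactly the characters at positions i, i+keysize, i+2*keysize, ...
--     n = len(enc_val)
--     return [''.join(enc_val[j] for j in range(i, n, keysize)) for i in range(keysize)]
-- ===== Notes on version B (the rewrite author's own statement) =====
-- stated objective: simpler
-- what changed: A distributes each of the n characters into a pre-built list of blocks via a (j+1)%keysize index with a special case; B builds each of the keysize blocks independently as the strided gather of positions i, i+keysize, i+2*keysize, ... in one comprehension.
import Mathlib
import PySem

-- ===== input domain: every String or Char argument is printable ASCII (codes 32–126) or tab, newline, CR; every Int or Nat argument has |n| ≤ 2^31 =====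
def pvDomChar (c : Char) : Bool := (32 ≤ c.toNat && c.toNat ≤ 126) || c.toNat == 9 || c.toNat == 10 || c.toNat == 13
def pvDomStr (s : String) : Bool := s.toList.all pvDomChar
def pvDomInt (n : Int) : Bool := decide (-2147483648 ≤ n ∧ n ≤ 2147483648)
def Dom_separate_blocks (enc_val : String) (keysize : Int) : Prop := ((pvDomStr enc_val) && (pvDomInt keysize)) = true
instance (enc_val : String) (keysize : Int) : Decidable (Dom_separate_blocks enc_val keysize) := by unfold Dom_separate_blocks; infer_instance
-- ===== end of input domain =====

-- B replaces A's single distributing pass (index (j+1)%keysize with a special case) by keysize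
-- independent strided gathers, one per block: simpler decomposition, same O(n) cost.

-- ===== PORT A =====
-- Blocks are kept as List Char during the loop and turned into String at the end
-- (exact: Python's '' and s += c on strings are modelled on the code-point lists).
def separate_blocks (enc_val : String) (keysize : Int) : List String :=
  let blocks : List (List Char) :=
    (PySem.List.pyRange 0 keysize 1).map (fun _ => [])
  let cs := enc_val.toList
  let final :=
    (PySem.List.pyRange 0 (PySem.Str.len enc_val) 1).foldl
      (fun blocks j =>
        if PySem.Int.mod (j + 1) keysize = 0 then
          blocks.set (keysize - 1).toNat
            (blocks.getD (keysize - 1).toNat [] ++ [PySem.List.pyGetD cs j ' '])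
        else
          blocks.set (PySem.Int.mod (j + 1) keysize - 1).toNat
            (blocks.getD (PySem.Int.mod (j + 1) keysize - 1).toNat [] ++ [PySem.List.pyGetD cs j ' ']))
      blocks
  final.map String.ofList

-- ===== PORT B =====
def separate_blocks_alt (enc_val : String) (keysize : Int) : List String :=
  let n : Int := PySem.Str.len enc_val
  (PySem.List.pyRange 0 keysize 1).map (fun i =>
    String.ofList ((PySem.List.pyRange i n keysize).map
      (fun j => PySem.List.pyGetD enc_val.toList j ' ')))

-- ===== PRECONDITION & SPEC =====
-- Pre_ excludes exactly the inputs where A raises: keysize <= 0 with a non-empty string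
-- (ZeroDivisionError for keysize = 0, IndexError for keysize < 0).
def Pre_separate_blocks (enc_val : String) (keysize : Int) : Prop :=
  1 ≤ keysize ∨ enc_val = ""
instance (enc_val : String) (keysize : Int) : Decidable (Pre_separate_blocks enc_val keysize) := by unfold Pre_separate_blocks; infer_instance

def pvWitness_separate_blocks : String × Int := ("abcdefg", 3)

def Spec_separate_blocks (enc_val : String) (keysize : Int) (out : List String) : Prop := out = separate_blocks_alt enc_val keysize
instance (enc_val : String) (keysize : Int) (out : List String) : Decidable (Spec_separate_blocks enc_val keysize out) := by unfold Spec_separate_blocks; infer_instance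

-- ===== CLAIM (what is proved, stated in full; the proofs are below) =====
def Claim_equal_separate_blocks : Prop := ∀ (enc_val : String) (keysize : Int), Dom_separate_blocks enc_val keysize → Pre_separate_blocks enc_val keysize → Spec_separate_blocks enc_val keysize (separate_blocks enc_val keysize)

-- ===== LEMMAS AND PROOFS =====

-- A's branchy index (j+1)%k (with the special case for 0) collapses to j%k.
lemma pv_mod_succ (k j : Int) (hk : 0 < k) :
    (PySem.Int.mod (j + 1) k = 0 ∧ PySem.Int.mod j k = k - 1) ∨
    (PySem.Int.mod (j + 1) k ≠ 0 ∧ PySem.Int.mod (j + 1) k = PySem.Int.mod j k + 1) := by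
  rw [PySem.Int.mod_eq_emod_of_pos hk, PySem.Int.mod_eq_emod_of_pos hk]
  have hdm : k * (j / k) + j % k = j := Int.mul_ediv_add_emod j k
  have hr0 : 0 ≤ j % k := Int.emod_nonneg j (ne_of_gt hk)
  have hr1 : j % k < k := Int.emod_lt_of_pos j hk
  have hstep : (j + 1) % k = (j % k + 1) % k := by
    conv_lhs => rw [show j + 1 = (j % k + 1) + k * (j / k) by omega]
    rw [Int.add_mul_emod_self_left]
  by_cases hcase : j % k + 1 = k
  · exact Or.inl ⟨by rw [hstep, hcase, Int.emod_self], by omega⟩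
  · have h2 : (j % k + 1) % k = j % k + 1 := Int.emod_eq_of_lt (by omega) (by omega)
    rw [hstep, h2]
    exact Or.inr ⟨by omega, by omega⟩

lemma pv_step_eq (k j : Int) (bl : List (List Char)) (c : Char) (hk : 0 < k) :
    (if PySem.Int.mod (j + 1) k = 0 then
        bl.set (k - 1).toNat (bl.getD (k - 1).toNat [] ++ [c])
      else
        bl.set (PySem.Int.mod (j + 1) k - 1).toNat
          (bl.getD (PySem.Int.mod (j + 1) k - 1).toNat [] ++ [c]))
    = bl.set (PySem.Int.mod j k).toNat (bl.getD (PySem.Int.mod j k).toNat [] ++ [c]) := by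
  rcases pv_mod_succ k j hk with ⟨h0, hr⟩ | ⟨h0, hr⟩
  · rw [if_pos h0, hr]
  · rw [if_neg h0, hr]
    simp

lemma pv_stride_succ (i k : Int) (m : Nat) (hk : 0 < k) (hi : 0 ≤ i) (hik : i < k) :
    PySem.List.pyRange i ((m : Int) + 1) k
      = PySem.List.pyRange i (m : Int) k ++ (if PySem.Int.mod (m : Int) k = i then [(m : Int)] else []) := by
  rw [PySem.List.pyRange_of_pos _ _ hk, PySem.List.pyRange_of_pos _ _ hk,
      PySem.Int.mod_eq_emod_of_pos hk]
  by_cases him : (m : Int) < i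
  · have hmod : (m : Int) % k = (m : Int) := Int.emod_eq_of_lt (by omega) (by omega)
    rw [if_neg (by omega : ¬ (i < (m:Int))), if_neg (by omega : ¬ (i < (m:Int) + 1)),
        if_neg (by omega : ¬ (m : Int) % k = i)]
    simp
  · have hd0 : 0 ≤ (m : Int) - i := by omega
    have hq0 : 0 ≤ ((m : Int) - i) / k := Int.ediv_nonneg hd0 (le_of_lt hk)
    have hdm : k * (((m : Int) - i) / k) + ((m : Int) - i) % k = (m : Int) - i := Int.mul_ediv_add_emod _ k
    have hr0 : 0 ≤ ((m : Int) - i) % k := Int.emod_nonneg _ (ne_of_gt hk)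
    have hr1 : ((m : Int) - i) % k < k := Int.emod_lt_of_pos _ hk
    have hkq0 : 0 ≤ k * (((m : Int) - i) / k) := mul_nonneg (le_of_lt hk) hq0
    set q : Int := ((m : Int) - i) / k with hqdef
    set r : Int := ((m : Int) - i) % k with hrdef
    have hmodm : (m : Int) % k = (i + r) % k := by
      rw [show (m : Int) = (i + r) + k * q by omega]
      exact Int.add_mul_emod_self_left ..
    have hcnt1 : ((m : Int) + 1 - i + k - 1) / k = q + 1 := by
      rw [show (m : Int) + 1 - i + k - 1 = ((m:Int) - i) + k * 1 by ring]
      rw [Int.add_mul_ediv_left _ 1 (ne_of_gt hk)]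
    by_cases hrz : r = 0
    · have hmod : (m : Int) % k = i := by
        rw [hmodm, hrz, add_zero]
        exact Int.emod_eq_of_lt hi hik
      have hcnt0 : (if i < (m : Int) then (((m : Int) - i + k - 1) / k).toNat else 0) = q.toNat := by
        by_cases him2 : i < (m : Int)
        · rw [if_pos him2]
          have : ((m : Int) - i + k - 1) / k = q := by
            rw [show (m : Int) - i + k - 1 = (k - 1) + k * q by omega]
            rw [Int.add_mul_ediv_left _ q (ne_of_gt hk),
                Int.ediv_eq_zero_of_lt (by omega) (by omega), zero_add]
          rw [this]
        · rw [if_neg him2]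
          have hkq : k * q = 0 := by omega
          rcases mul_eq_zero.mp hkq with h | h
          · omega
          · omega
      rw [if_pos (by omega : i < (m : Int) + 1), hcnt1, hcnt0, if_pos hmod]
      rw [show (q + 1).toNat = q.toNat + 1 by omega, List.range_succ, List.map_append]
      simp only [List.map_cons, List.map_nil]
      congr 2
      rw [Int.toNat_of_nonneg hq0]
      omega
    · have hmod : ¬ ((m : Int) % k = i) := by
        rw [hmodm]
        by_cases hik2 : i + r < k
        · have : (i + r) % k = i + r := Int.emod_eq_of_lt (by omega) hik2
          omega
        · have : (i + r) % k = i + r - k := by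
            conv_lhs => rw [show i + r = (i + r - k) + k * 1 by ring]
            rw [Int.add_mul_emod_self_left]
            exact Int.emod_eq_of_lt (by omega) (by omega)
          omega
      have hcnt0 : (((m : Int) - i + k - 1) / k) = q + 1 := by
        rw [show (m : Int) - i + k - 1 = ((r - 1) + k * 1) + k * q by omega]
        rw [Int.add_mul_ediv_left _ q (ne_of_gt hk), Int.add_mul_ediv_left _ 1 (ne_of_gt hk),
            Int.ediv_eq_zero_of_lt (by omega) (by omega)]
        ring
      rw [if_pos (by omega : i < (m : Int) + 1), hcnt1,
          if_pos (by omega : i < (m : Int)), hcnt0, if_neg hmod]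
      simp

lemma pv_inv (cs : List Char) (k : Int) (hk : 0 < k) (m : Nat) :
    (PySem.List.pyRange 0 (m : Int) 1).foldl
      (fun blocks j =>
        if PySem.Int.mod (j + 1) k = 0 then
          blocks.set (k - 1).toNat
            (blocks.getD (k - 1).toNat [] ++ [PySem.List.pyGetD cs j ' '])
        else
          blocks.set (PySem.Int.mod (j + 1) k - 1).toNat
            (blocks.getD (PySem.Int.mod (j + 1) k - 1).toNat [] ++ [PySem.List.pyGetD cs j ' ']))
      ((PySem.List.pyRange 0 k 1).map (fun _ => []))
    = (PySem.List.pyRange 0 k 1).map (fun i =>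
        (PySem.List.pyRange i (m : Int) k).map (fun j => PySem.List.pyGetD cs j ' ')) := by
  induction m with
  | zero =>
      rw [Nat.cast_zero, PySem.List.pyRange_one_eq_nil (le_refl 0)]
      simp only [List.foldl_nil]
      apply List.map_congr_left
      intro i hi
      have hi0 : 0 ≤ i := (PySem.List.mem_pyRange_one.1 hi).1
      rw [PySem.List.pyRange_of_pos _ _ hk, if_neg (by omega : ¬ i < 0)]
      simp
  | succ m ih =>
      rw [Nat.cast_succ, PySem.List.pyRange_one_succ_right (Int.natCast_nonneg m),
          List.foldl_append, List.foldl_cons, List.foldl_nil, ih,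
          pv_step_eq k (m : Int) _ _ hk]
      have hr0 : 0 ≤ PySem.Int.mod (m : Int) k := PySem.Int.mod_nonneg _ hk
      have hr1 : PySem.Int.mod (m : Int) k < k := PySem.Int.mod_lt _ hk
      apply List.ext_getElem
      · simp [PySem.List.length_pyRange_one]
      · intro t h1 h2
        have ht : t < k.toNat := by
          simp only [List.length_map, PySem.List.length_pyRange_one] at h2
          omega
        have hrt : (PySem.Int.mod (m : Int) k).toNat < k.toNat := by omega
        rw [List.getElem_set, List.getElem_map, List.getElem_map, PySem.List.getElem_pyRange_one,
            zero_add, pv_stride_succ (t : Int) k m hk (Int.natCast_nonneg t) (by omega)]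
        by_cases hteq : (PySem.Int.mod (m : Int) k).toNat = t
        · have hmt : PySem.Int.mod (m : Int) k = (t : Int) := by omega
          rw [if_pos hteq, if_pos hmt,
              List.getD_eq_getElem _ _ (by simp only [List.length_map, PySem.List.length_pyRange_one]; omega),
              List.getElem_map, PySem.List.getElem_pyRange_one, zero_add, List.map_append,
              List.map_cons, List.map_nil, Int.toNat_of_nonneg hr0, hmt]
        · rw [if_neg hteq, if_neg (by omega : ¬ PySem.Int.mod (m : Int) k = (t : Int))]
          simp

-- A and B coincide when the blocks list is empty (keysize ≤ 0, empty string).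
lemma pv_empty_case (k : Int) (hk : k ≤ 0) :
    separate_blocks "" k = separate_blocks_alt "" k := by
  simp [separate_blocks, separate_blocks_alt, PySem.List.pyRange_one_eq_nil hk]

-- ===== VERDICT (by name: the statement is the Claim_ definition above) =====
theorem separate_blocks_spec : Claim_equal_separate_blocks := by
  intro enc_val keysize hdom hpre
  unfold Spec_separate_blocks separate_blocks separate_blocks_alt
  by_cases hk : 1 ≤ keysize
  · have hk0 : 0 < keysize := by omega
    simp only [PySem.Str.len_eq]
    rw [pv_inv enc_val.toList keysize hk0 enc_val.toList.length, List.map_map]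
    rfl
  · rcases hpre with h | h
    · omega
    · subst h
      have := pv_empty_case keysize (by omega)
      simpa [separate_blocks, separate_blocks_alt] using this
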